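-- pv_equiv track=rewrite | github.com/Jnavarr56/hot-reloading-practice-test-suite | practice_problems.py | div_by_5_7
-- ===== SOURCE A (Python) =====
-- def div_by_5_7(n):
--     output = ""
--
--     i = 0
--     while i < n:
--         if i % 5 == 0 and i % 7 == 0:
--             nextNum = ("" if output == "" else ",") + str(i)
--             output += nextNum
--
--         i += 1
--
--     return output
-- ===== SOURCE B (Python) =====
-- def div_by_5_7(n):
--     # Numbers divisible by both 5 and 7 are exactly the multiples of 35:
--     # step through them directly instead of testing every i < n.
--     return ",".join(str(i) for i in range(0, n, 35))
-- ===== Notes on version B (the rewrite author's own statement) =====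
-- stated objective: faster
-- what changed: Replaces the per-integer divisibility scan and manual comma bookkeeping with a direct iteration over multiples of 35 (range(0, n, 35)) joined by ','.
import Mathlib
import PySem

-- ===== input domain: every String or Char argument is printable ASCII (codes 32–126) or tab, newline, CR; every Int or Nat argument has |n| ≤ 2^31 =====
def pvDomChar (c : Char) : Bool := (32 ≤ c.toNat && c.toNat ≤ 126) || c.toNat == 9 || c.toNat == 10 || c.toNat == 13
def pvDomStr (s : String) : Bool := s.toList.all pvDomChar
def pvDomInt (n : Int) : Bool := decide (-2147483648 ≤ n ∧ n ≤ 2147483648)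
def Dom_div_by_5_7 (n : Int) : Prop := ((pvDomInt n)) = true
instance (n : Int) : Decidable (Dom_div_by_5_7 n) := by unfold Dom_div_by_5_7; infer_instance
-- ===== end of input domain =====

-- B iterates the multiples of 35 directly (range(0, n, 35)) and joins them, instead of
-- testing every i < n for divisibility by 5 and 7 with manual comma bookkeeping.

-- ===== PORT A =====
-- the body of A's if: output += ("" if output == "" else ",") + str(i)
def pvStepA (output : String) (i : Int) : String :=
  output ++ ((if output = "" then "" else ",") ++ PySem.Int.toStr i)

-- the while loop: i counts up from 0 while i < n; fuel n.toNat bounds the iterations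
def pvALoop (n : Int) (fuel : Nat) (i : Int) (output : String) : String :=
  match fuel with
  | 0 => output
  | f + 1 =>
    if i < n then
      pvALoop n f (i + 1)
        (if PySem.Int.mod i 5 = 0 ∧ PySem.Int.mod i 7 = 0 then pvStepA output i else output)
    else output

def div_by_5_7 (n : Int) : String := pvALoop n n.toNat 0 ""

-- ===== PORT B =====
def div_by_5_7_alt (n : Int) : String :=
  PySem.Str.join "," ((PySem.List.pyRange 0 n 35).map PySem.Int.toStr)

-- ===== PRECONDITION & SPEC =====
def Spec_div_by_5_7 (n : Int) (out : String) : Prop := out = div_by_5_7_alt n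
instance (n : Int) (out : String) : Decidable (Spec_div_by_5_7 n out) := by unfold Spec_div_by_5_7; infer_instance

-- ===== CLAIM (what is proved, stated in full; the proofs are below) =====
def Claim_equal_div_by_5_7 : Prop := ∀ (n : Int), Dom_div_by_5_7 n → Spec_div_by_5_7 n (div_by_5_7 n)

-- ===== LEMMAS AND PROOFS =====

-- str(i) is never the empty string
theorem pv_toDigitsCore_ne_nil (b : Nat) : ∀ (f n : Nat) (ds : List Char), ds ≠ [] →
    Nat.toDigitsCore b f n ds ≠ [] := by
  intro f
  induction f with
  | zero => intro n ds h; simpa [Nat.toDigitsCore] using h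
  | succ f ih =>
    intro n ds h
    simp only [Nat.toDigitsCore]
    split
    · simp
    · exact ih _ _ (by simp)

theorem pv_toChars_ne_nil (n : Int) : PySem.Int.toChars n ≠ [] := by
  unfold PySem.Int.toChars
  split
  · simp
  · unfold Nat.toDigits
    simp only [Nat.toDigitsCore]
    split
    · simp
    · exact pv_toDigitsCore_ne_nil 10 _ _ _ (by simp)

theorem pv_toStr_toList_ne_nil (n : Int) : (PySem.Int.toStr n).toList ≠ [] := by
  rw [PySem.Int.toList_toStr]; exact pv_toChars_ne_nil n

theorem pv_toStr_ne_empty (n : Int) : PySem.Int.toStr n ≠ "" := by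
  intro h
  exact pv_toStr_toList_ne_nil n (by rw [h]; rfl)

theorem pv_append_ne_empty (s t : String) (h : t ≠ "") : s ++ t ≠ "" := by
  intro h2
  apply h
  have h3 := congrArg String.toList h2
  rw [String.toList_append] at h3
  have : t.toList = [] := by
    have h4 : s.toList ++ t.toList = [] := h3
    exact (List.append_eq_nil_iff.mp h4).2
  exact String.toList_inj.mp (by rw [this]; rfl)

-- "," ++ join of the tail (empty when the tail is empty)
def pvCommaTail : List Int → String
  | [] => ""
  | x :: xs => "," ++ PySem.Str.join "," (PySem.Int.toStr x :: xs.map PySem.Int.toStr)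

theorem pv_join_toList (x : Int) (xs : List Int) :
    (PySem.Str.join "," (PySem.Int.toStr x :: xs.map PySem.Int.toStr)).toList
      = (PySem.Int.toStr x).toList ++ (pvCommaTail xs).toList := by
  cases xs with
  | nil => simp [PySem.Str.toList_join, PySem.Chars.join_singleton, pvCommaTail]
  | cons y ys =>
    simp only [pvCommaTail, List.map_cons, PySem.Str.toList_join, String.toList_append,
      PySem.Chars.join_cons_cons]
    simp

theorem pv_foldl_step (l : List Int) : ∀ (out : String),
    l.foldl pvStepA out
      = if out = "" then PySem.Str.join "," (l.map PySem.Int.toStr) else out ++ pvCommaTail l := by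
  induction l with
  | nil =>
    intro out
    split
    · next h => subst h; apply String.toList_inj.mp; simp [PySem.Str.toList_join, PySem.Chars.join_nil]
    · apply String.toList_inj.mp; simp [pvCommaTail]
  | cons x xs ih =>
    intro out
    rw [List.foldl_cons, ih (pvStepA out x)]
    have hne : pvStepA out x ≠ "" := by
      unfold pvStepA
      apply pv_append_ne_empty
      apply pv_append_ne_empty
      exact pv_toStr_ne_empty x
    rw [if_neg hne]
    by_cases h : out = ""
    · subst h
      rw [if_pos rfl]
      apply String.toList_inj.mp
      simp only [List.map_cons]
      rw [pv_join_toList]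
      simp [pvStepA]
    · rw [if_neg h]
      apply String.toList_inj.mp
      simp only [pvStepA, if_neg h, pvCommaTail, String.toList_append, List.map_cons]
      rw [pv_join_toList]
      simp
      cases xs <;> rfl

-- the multiples of 35 that A's scan keeps, as a filtered range
def pvMults (i n : Int) : List Int :=
  (PySem.List.pyRange i n 1).filter
    (fun x => decide (PySem.Int.mod x 5 = 0 ∧ PySem.Int.mod x 7 = 0))

theorem pv_aLoop_eq (f : Nat) : ∀ (n i : Int) (out : String), n ≤ i + f →
    pvALoop n f i out = (pvMults i n).foldl pvStepA out := by
  induction f with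
  | zero =>
    intro n i out h
    simp only [Nat.cast_zero, add_zero] at h
    simp [pvALoop, pvMults, PySem.List.pyRange_one_eq_nil h]
  | succ f ih =>
    intro n i out h
    by_cases hlt : i < n
    · rw [pvMults, PySem.List.pyRange_one_cons hlt, List.filter_cons]
      simp only [pvALoop, if_pos hlt]
      rw [ih n (i + 1) _ (by push_cast at h ⊢; omega)]
      by_cases hp : (5:Int) ∣ i ∧ (7:Int) ∣ i
      · simp [pvMults, PySem.Int.mod_eq_zero_iff_dvd, hp]
      · simp [pvMults, PySem.Int.mod_eq_zero_iff_dvd, hp]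
    · simp [pvALoop, if_neg hlt, pvMults,
        PySem.List.pyRange_one_eq_nil (by omega : n ≤ i)]

theorem pv_mults_eq (n : Int) : pvMults 0 n = PySem.List.pyRange 0 n 35 := by
  have h35 : (0:Int) < 35 := by norm_num
  unfold pvMults
  apply List.Perm.eq_of_pairwise
    (le := fun a b : Int => a < b)
    (fun a b _ _ hab hba => absurd hba (by omega))
  · exact (PySem.List.pairwise_lt_pyRange_one 0 n).filter _
  · rw [PySem.List.pyRange_of_pos 0 n h35]
    exact (List.pairwise_lt_range).map _ (by intro a b hab; push_cast; omega)
  · rw [List.perm_ext_iff_of_nodup ((PySem.List.nodup_pyRange_one 0 n).filter _)]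
    · intro x
      simp only [List.mem_filter, PySem.List.mem_pyRange_one, decide_eq_true_eq,
        PySem.Int.mod_eq_zero_iff_dvd, PySem.List.mem_pyRange_iff_of_pos h35]
      omega
    · rw [PySem.List.pyRange_of_pos 0 n h35]
      exact ((List.pairwise_lt_range).map _
        (by intro a b hab; push_cast; omega)).imp (fun h => ne_of_lt h)

-- ===== VERDICT (by name: the statement is the Claim_ definition above) =====
theorem div_by_5_7_spec : Claim_equal_div_by_5_7 := by
  intro n _
  unfold Spec_div_by_5_7 div_by_5_7 div_by_5_7_alt
  rw [pv_aLoop_eq n.toNat n 0 "" (by simpa using Int.self_le_toNat n)]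
  rw [pv_foldl_step, if_pos rfl, pv_mults_eq]
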